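-- pv_equiv track=rewrite | github.com/Krosauer/GeoLink | Data/create_edges.py | make_edges_from_range
-- ===== SOURCE A (Python) =====
-- def make_edges_from_range(data,seperation, connection):
--     edges = []
--     for key, value in data.items():
--         for key2, value2 in data.items():
--             if key != key2:
--                 if abs(value - value2) <= seperation:
--                     if (key2, key, connection) not in edges:
--                         edges.append((key, key2, connection))
--     return edges
-- ===== SOURCE B (Python) =====
-- def make_edges_from_range(data, seperation, connection):
--     # One forward sweep over suffixes: each item pairs only with the items
--     # after it, so the reverse-pair membership scan of the original is never
--     # needed and each unordered pair is examined once.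
--     edges = []
--     rest = list(data.items())
--     while rest:
--         (key, value), rest = rest[0], rest[1:]
--         edges += [(key, key2, connection) for key2, value2 in rest
--                   if abs(value - value2) <= seperation]
--     return edges
-- ===== Notes on version B (the rewrite author's own statement) =====
-- stated objective: faster
-- what changed: Replaces the all-ordered-pairs double scan with a reverse-pair membership test on the growing edge list by a single forward sweep in which each item pairs only with the items after it, so the dedup scan disappears.
import Mathlib
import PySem

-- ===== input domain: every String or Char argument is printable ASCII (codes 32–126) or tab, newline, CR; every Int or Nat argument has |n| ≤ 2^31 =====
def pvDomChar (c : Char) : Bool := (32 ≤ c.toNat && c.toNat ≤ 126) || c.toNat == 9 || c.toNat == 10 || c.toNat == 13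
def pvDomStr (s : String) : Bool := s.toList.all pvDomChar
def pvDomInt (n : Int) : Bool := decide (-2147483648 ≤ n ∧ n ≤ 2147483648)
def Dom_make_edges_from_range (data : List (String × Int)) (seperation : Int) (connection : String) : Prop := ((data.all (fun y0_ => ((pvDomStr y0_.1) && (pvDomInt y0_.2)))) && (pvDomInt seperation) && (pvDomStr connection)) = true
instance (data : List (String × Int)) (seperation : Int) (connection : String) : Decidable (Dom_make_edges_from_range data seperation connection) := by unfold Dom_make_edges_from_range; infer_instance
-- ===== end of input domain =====

-- B replaces A's all-ordered-pairs scan with reverse-pair dedup by a single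
-- forward sweep pairing each item with the later items only (faster: no
-- membership scan of the growing edge list).

-- ===== PORT A =====
-- inner-loop body: for key2, value2 in data.items(): …
def aInner (seperation : Int) (connection : String) (k : String) (v : Int)
    (edges : List (String × String × String)) (kv2 : String × Int) :
    List (String × String × String) :=
  if k ≠ kv2.1 then
    if |v - kv2.2| ≤ seperation then
      if (kv2.1, k, connection) ∉ edges then edges ++ [(k, kv2.1, connection)]
      else edges
    else edges
  else edges

def make_edges_from_range (data : List (String × Int)) (seperation : Int) (connection : String) : List (String × String × String) :=
  data.foldl (fun edges kv => data.foldl (aInner seperation connection kv.1 kv.2) edges) []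

-- ===== PORT B =====
-- the list comprehension over the remaining suffix
def bRow (seperation : Int) (connection : String) (k : String) (v : Int)
    (rest : List (String × Int)) : List (String × String × String) :=
  (rest.filter (fun kv2 => decide (|v - kv2.2| ≤ seperation))).map
    (fun kv2 => (k, kv2.1, connection))

-- the while loop: pop the head, pair it with the rest, continue on the rest
def bGo (seperation : Int) (connection : String)
    (edges : List (String × String × String)) :
    List (String × Int) → List (String × String × String)
  | [] => edges
  | (k, v) :: rest => bGo seperation connection (edges ++ bRow seperation connection k v rest) rest

def make_edges_from_range_alt (data : List (String × Int)) (seperation : Int) (connection : String) : List (String × String × String) :=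
  bGo seperation connection [] data

-- ===== PRECONDITION & SPEC =====
-- Pre_ excludes lists with duplicate keys: the argument is a Python dict, whose
-- items always have pairwise-distinct keys, so a duplicate-key association list
-- does not represent any dict input of A.
def Pre_make_edges_from_range (data : List (String × Int)) (seperation : Int) (connection : String) : Prop :=
  (data.map Prod.fst).Nodup
instance (data : List (String × Int)) (seperation : Int) (connection : String) : Decidable (Pre_make_edges_from_range data seperation connection) := by unfold Pre_make_edges_from_range; infer_instance

def pvWitness_make_edges_from_range : (List (String × Int)) × Int × String :=
  ([("a", 1), ("b", 3), ("c", 10)], 2, "near")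

def Spec_make_edges_from_range (data : List (String × Int)) (seperation : Int) (connection : String) (out : List (String × String × String)) : Prop := out = make_edges_from_range_alt data seperation connection
instance (data : List (String × Int)) (seperation : Int) (connection : String) (out : List (String × String × String)) : Decidable (Spec_make_edges_from_range data seperation connection out) := by unfold Spec_make_edges_from_range; infer_instance

-- ===== CLAIM (what is proved, stated in full; the proofs are below) =====
def Claim_equal_make_edges_from_range : Prop := ∀ (data : List (String × Int)) (seperation : Int) (connection : String), Dom_make_edges_from_range data seperation connection → Pre_make_edges_from_range data seperation connection → Spec_make_edges_from_range data seperation connection (make_edges_from_range data seperation connection)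

-- ===== LEMMAS AND PROOFS =====

-- edges accumulated by the rows of `pre`, each row pairing with what follows it
def rowsR (seperation : Int) (connection : String) :
    List (String × Int) → List (String × Int) → List (String × String × String)
  | [], _ => []
  | (k, v) :: pre, suf =>
      bRow seperation connection k v (pre ++ suf) ++ rowsR seperation connection pre suf

theorem bGo_eq_append (sep : Int) (conn : String) (edges : List (String × String × String))
    (l : List (String × Int)) :
    bGo sep conn edges l = edges ++ rowsR sep conn l [] := by
  induction l generalizing edges with
  | nil => simp [bGo, rowsR]
  | cons kv t ih =>
      obtain ⟨k, v⟩ := kv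
      simp [bGo, rowsR, ih, List.append_assoc]

theorem mem_rowsR_fst (sep : Int) (conn : String) (pre suf : List (String × Int))
    (e : String × String × String) (he : e ∈ rowsR sep conn pre suf) :
    e.1 ∈ pre.map Prod.fst := by
  induction pre generalizing suf with
  | nil => simp [rowsR] at he
  | cons kv t ih =>
      obtain ⟨k, v⟩ := kv
      simp only [rowsR, List.mem_append] at he
      rcases he with h | h
      · simp only [bRow, List.mem_map, List.mem_filter] at h
        obtain ⟨kv2, -, he⟩ := h
        simp [← he]
      · simpa using Or.inr (ih suf h)

theorem mem_rowsR_of_mem (sep : Int) (conn : String) (pre suf : List (String × Int))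
    (k2 : String) (v2 : Int) (k : String) (v : Int)
    (h2 : (k2, v2) ∈ pre) (h : (k, v) ∈ suf) (hc : |v2 - v| ≤ sep) :
    (k2, k, conn) ∈ rowsR sep conn pre suf := by
  induction pre generalizing suf with
  | nil => simp at h2
  | cons kv t ih =>
      obtain ⟨ka, va⟩ := kv
      simp only [List.mem_cons, Prod.mk.injEq] at h2
      simp only [rowsR, List.mem_append]
      rcases h2 with ⟨hk, hv⟩ | h2
      · left
        subst hk hv
        simp only [bRow, List.mem_map, List.mem_filter]
        exact ⟨(k, v), ⟨by simp [h], by simpa using hc⟩, rfl⟩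
      · exact Or.inr (ih suf h2 h)

theorem inner_noop (sep : Int) (conn : String) (k : String) (v : Int)
    (l : List (String × Int)) (edges : List (String × String × String))
    (h : ∀ kv2 ∈ l, k = kv2.1 ∨ ¬ |v - kv2.2| ≤ sep ∨ (kv2.1, k, conn) ∈ edges) :
    l.foldl (aInner sep conn k v) edges = edges := by
  induction l with
  | nil => rfl
  | cons kv2 t ih =>
      have hh := h kv2 (by simp)
      have hstep : aInner sep conn k v edges kv2 = edges := by
        unfold aInner
        rcases hh with h1 | h2 | h3
        · simp [h1]
        · split_ifs <;> simp_all
        · split_ifs <;> simp_all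
      simp only [List.foldl_cons, hstep]
      exact ih (fun kv2 hk => h kv2 (by simp [hk]))

theorem inner_append (sep : Int) (conn : String) (k : String) (v : Int)
    (l : List (String × Int)) (edges : List (String × String × String))
    (h : ∀ kv2 ∈ l, kv2.1 ≠ k ∧ (kv2.1, k, conn) ∉ edges) :
    l.foldl (aInner sep conn k v) edges = edges ++ bRow sep conn k v l := by
  induction l generalizing edges with
  | nil => simp [bRow]
  | cons kv2 t ih =>
      obtain ⟨k2, v2⟩ := kv2
      obtain ⟨hne, hnm⟩ := h (k2, v2) (by simp)
      by_cases hc : |v - v2| ≤ sep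
      · have hstep : aInner sep conn k v edges (k2, v2) = edges ++ [(k, k2, conn)] := by
          unfold aInner
          simp [Ne.symm hne, hc, hnm]
        simp only [List.foldl_cons, hstep]
        rw [ih (edges ++ [(k, k2, conn)]) ?_]
        · simp [bRow, hc, List.append_assoc]
        · intro kv3 hk3
          obtain ⟨h3ne, h3nm⟩ := h kv3 (by simp [hk3])
          refine ⟨h3ne, ?_⟩
          simp only [List.mem_append, List.mem_singleton]
          rintro (hmem | hmem)
          · exact h3nm hmem
          · exact h3ne (congrArg Prod.fst hmem)
      · have hstep : aInner sep conn k v edges (k2, v2) = edges := by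
          unfold aInner
          simp [Ne.symm hne, hc]
        simp only [List.foldl_cons, hstep]
        rw [ih edges (fun kv3 hk3 => h kv3 (by simp [hk3]))]
        simp [bRow, hc]

theorem rowsR_snoc (sep : Int) (conn : String) (pre suf : List (String × Int))
    (k : String) (v : Int) :
    rowsR sep conn (pre ++ [(k, v)]) suf
      = rowsR sep conn pre ((k, v) :: suf) ++ bRow sep conn k v suf := by
  induction pre generalizing suf with
  | nil => simp [rowsR]
  | cons kv t ih =>
      obtain ⟨ka, va⟩ := kv
      simp [rowsR, ih, List.append_assoc]

-- one outer iteration, given the invariant, processed over the whole data list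
theorem inner_full (sep : Int) (conn : String) (pre suf : List (String × Int))
    (k : String) (v : Int)
    (hnd : ((pre ++ (k, v) :: suf).map Prod.fst).Nodup) :
    (pre ++ (k, v) :: suf).foldl (aInner sep conn k v)
        (rowsR sep conn pre ((k, v) :: suf))
      = rowsR sep conn (pre ++ [(k, v)]) suf := by
  have hnd' := hnd
  rw [List.map_append, List.nodup_append] at hnd'
  obtain ⟨hpre, hsuf, hdisj⟩ := hnd'
  simp only [List.map_cons, List.nodup_cons] at hsuf
  rw [List.foldl_append]
  rw [inner_noop sep conn k v pre _ ?hpre]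
  case hpre =>
    intro kv2 h2
    by_cases hk : k = kv2.1
    · exact Or.inl hk
    by_cases hc : |v - kv2.2| ≤ sep
    · refine Or.inr (Or.inr ?_)
      exact mem_rowsR_of_mem sep conn pre ((k, v) :: suf) kv2.1 kv2.2 k v h2 (by simp)
        (by rw [abs_sub_comm]; exact hc)
    · exact Or.inr (Or.inl hc)
  simp only [List.foldl_cons]
  have hself : aInner sep conn k v (rowsR sep conn pre ((k, v) :: suf)) (k, v)
      = rowsR sep conn pre ((k, v) :: suf) := by
    unfold aInner; simp
  rw [hself]
  rw [inner_append sep conn k v suf _ ?hsuf]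
  case hsuf =>
    intro kv3 h3
    constructor
    · intro he
      exact hsuf.1 (by rw [← he]; exact List.mem_map_of_mem h3)
    · intro hmem
      have h1 := mem_rowsR_fst sep conn pre ((k, v) :: suf) (kv3.1, k, conn) hmem
      simp only at h1
      have h2 : kv3.1 ∈ List.map Prod.fst ((k, v) :: suf) := by
        simp only [List.map_cons, List.mem_cons, List.mem_map]
        exact Or.inr ⟨kv3, h3, rfl⟩
      exact hdisj kv3.1 h1 kv3.1 h2 rfl
  exact (rowsR_snoc sep conn pre suf k v).symm

theorem outer_loop (sep : Int) (conn : String) (suf pre data : List (String × Int))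
    (hdata : data = pre ++ suf) (hnd : (data.map Prod.fst).Nodup) :
    suf.foldl (fun edges kv => data.foldl (aInner sep conn kv.1 kv.2) edges)
        (rowsR sep conn pre suf)
      = rowsR sep conn data [] := by
  induction suf generalizing pre with
  | nil => simp [hdata]
  | cons kv t ih =>
      obtain ⟨k, v⟩ := kv
      simp only [List.foldl_cons]
      rw [hdata, inner_full sep conn pre t k v (by rw [← hdata]; exact hnd), ← hdata]
      exact ih (pre ++ [(k, v)]) (by simp [hdata])

-- ===== VERDICT (by name: the statement is the Claim_ definition above) =====
theorem make_edges_from_range_spec : Claim_equal_make_edges_from_range := by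
  intro data sep conn _ hpre
  unfold Spec_make_edges_from_range make_edges_from_range make_edges_from_range_alt
  rw [bGo_eq_append]
  have h := outer_loop sep conn data [] data (by simp) hpre
  simpa [rowsR] using h
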